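-- pv_equiv track=rewrite | github.com/ChuOZhen/-minecraft-wiki | scripts/scraper/parser_item.py | generate_related_items
-- ===== SOURCE A (Python) =====
-- def generate_related_items(crafting, stonecutting=None, smithing=None):
--     seen = set()
--     related = []
--     for recipe in (crafting or []):
--         for ing_id in recipe.get('ingredients', {}):
--             if ing_id not in seen:
--                 related.append(ing_id)
--                 seen.add(ing_id)
--     for recipe in (stonecutting or []):
--         ing = recipe.get('input_id', '')
--         if ing and ing not in seen:
--             related.append(ing)
--             seen.add(ing)
--     for recipe in (smithing or []):
--         for key in ('template_id', 'base_id', 'addition_id'):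
--             ing = recipe.get(key, '')
--             if ing and ing not in seen:
--                 related.append(ing)
--                 seen.add(ing)
--     return related
-- ===== SOURCE B (Python) =====
-- def generate_related_items(crafting, stonecutting=None, smithing=None):
--     def dedup(xs):
--         if not xs:
--             return []
--         head = xs[0]
--         return [head] + dedup([y for y in xs[1:] if y != head])
--     cands = [i for r in (crafting or []) for i in r.get('ingredients', {})]
--     cands += [r.get('input_id', '') for r in (stonecutting or []) if r.get('input_id', '')]
--     cands += [i for r in (smithing or [])
--               for i in (r.get('template_id', ''), r.get('base_id', ''), r.get('addition_id', ''))
--               if i]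
--     return dedup(cands)
-- ===== Notes on version B (the rewrite author's own statement) =====
-- stated objective: alternative
-- what changed: B first gathers all candidate ids into one flat list and then deduplicates it by a recursive remove-duplicates-of-the-head algorithm (take the head, filter every later copy of it out of the tail, recurse) instead of A's single pass that threads a seen-set through every loop.
import Mathlib
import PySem

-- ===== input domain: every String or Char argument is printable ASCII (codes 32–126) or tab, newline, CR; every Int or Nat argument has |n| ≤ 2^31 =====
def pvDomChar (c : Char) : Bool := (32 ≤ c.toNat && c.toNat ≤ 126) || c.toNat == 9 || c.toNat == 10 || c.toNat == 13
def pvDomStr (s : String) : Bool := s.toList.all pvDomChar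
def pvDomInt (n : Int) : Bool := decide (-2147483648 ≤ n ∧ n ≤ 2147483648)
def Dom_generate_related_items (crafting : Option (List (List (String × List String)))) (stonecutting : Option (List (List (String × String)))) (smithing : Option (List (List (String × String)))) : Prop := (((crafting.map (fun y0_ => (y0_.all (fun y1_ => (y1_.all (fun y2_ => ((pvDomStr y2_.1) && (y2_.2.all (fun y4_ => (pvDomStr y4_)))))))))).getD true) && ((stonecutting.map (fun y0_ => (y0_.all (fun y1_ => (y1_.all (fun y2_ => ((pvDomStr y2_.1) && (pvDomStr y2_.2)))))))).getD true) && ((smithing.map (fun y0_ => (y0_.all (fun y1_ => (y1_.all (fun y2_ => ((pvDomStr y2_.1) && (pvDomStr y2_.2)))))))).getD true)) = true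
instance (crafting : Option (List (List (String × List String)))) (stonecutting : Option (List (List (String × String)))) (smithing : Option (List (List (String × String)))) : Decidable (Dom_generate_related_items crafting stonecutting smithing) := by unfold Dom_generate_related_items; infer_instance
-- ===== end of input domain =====

-- B gathers all candidate ids into one flat list, then deduplicates it by a recursive
-- "remove the head's duplicates from the tail and recurse" algorithm, instead of A's
-- single pass threading a seen-set through every loop (objective: alternative).

-- dict.get(k, dflt) on an association list: first match (shared helper of both ports)
def dget {α : Type} (r : List (String × α)) (k : String) (d : α) : α :=
  match r with
  | [] => d
  | (k', v) :: rest => if k' == k then v else dget rest k d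

-- ===== PORT A =====
def generate_related_items (crafting : Option (List (List (String × List String)))) (stonecutting : Option (List (List (String × String)))) (smithing : Option (List (List (String × String)))) : List String :=
  -- seen = set(), related = []
  let st0 : PySem.Set String × List String := (PySem.Set.empty, [])
  let st1 := (crafting.getD []).foldl (fun st recipe =>
      (dget recipe "ingredients" ([] : List String)).foldl (fun st ing_id =>
        if !(PySem.Set.contains st.1 ing_id) then (PySem.Set.add st.1 ing_id, st.2 ++ [ing_id]) else st) st) st0
  let st2 := (stonecutting.getD []).foldl (fun st recipe =>
      let ing := dget recipe "input_id" ""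
      if ing ≠ "" ∧ !(PySem.Set.contains st.1 ing) then (PySem.Set.add st.1 ing, st.2 ++ [ing]) else st) st1
  let st3 := (smithing.getD []).foldl (fun st recipe =>
      ["template_id", "base_id", "addition_id"].foldl (fun st key =>
        let ing := dget recipe key ""
        if ing ≠ "" ∧ !(PySem.Set.contains st.1 ing) then (PySem.Set.add st.1 ing, st.2 ++ [ing]) else st) st) st2
  st3.2

-- ===== PORT B =====
-- Source B's inner 'dedup': keep the head, filter its copies out of the tail, recurse
def dedupRec : List String → List String
  | [] => []
  | h :: t => h :: dedupRec (t.filter (fun y => y ≠ h))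
termination_by xs => xs.length
decreasing_by
  rw [List.length_unattach]
  exact Nat.lt_succ_of_le (le_trans (List.length_filter_le _ _) (by simp))

def generate_related_items_alt (crafting : Option (List (List (String × List String)))) (stonecutting : Option (List (List (String × String)))) (smithing : Option (List (List (String × String)))) : List String :=
  let cands := (crafting.getD []).flatMap (fun r => dget r "ingredients" ([] : List String))
  let cands := cands ++ ((stonecutting.getD []).map (fun r => dget r "input_id" "")).filter (fun i => i ≠ "")
  let cands := cands ++ (smithing.getD []).flatMap (fun r =>
      ([dget r "template_id" "", dget r "base_id" "", dget r "addition_id" ""]).filter (fun i => i ≠ ""))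
  dedupRec cands

-- ===== PRECONDITION & SPEC =====
def Spec_generate_related_items (crafting : Option (List (List (String × List String)))) (stonecutting : Option (List (List (String × String)))) (smithing : Option (List (List (String × String)))) (out : List String) : Prop := out = generate_related_items_alt crafting stonecutting smithing
instance (crafting : Option (List (List (String × List String)))) (stonecutting : Option (List (List (String × String)))) (smithing : Option (List (List (String × String)))) (out : List String) : Decidable (Spec_generate_related_items crafting stonecutting smithing out) := by unfold Spec_generate_related_items; infer_instance

-- ===== CLAIM (what is proved, stated in full; the proofs are below) =====
def Claim_equal_generate_related_items : Prop := ∀ (crafting : Option (List (List (String × List String)))) (stonecutting : Option (List (List (String × String)))) (smithing : Option (List (List (String × String)))), Dom_generate_related_items crafting stonecutting smithing → Spec_generate_related_items crafting stonecutting smithing (generate_related_items crafting stonecutting smithing)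

-- ===== LEMMAS AND PROOFS =====

-- A's seen-set loop body, abstracted over the element
def pvStep (st : PySem.Set String × List String) (x : String) : PySem.Set String × List String :=
  if !(PySem.Set.contains st.1 x) then (PySem.Set.add st.1 x, st.2 ++ [x]) else st

theorem pvStep_diag (s : PySem.Set String) (x : String) :
    pvStep (s, s) x = (PySem.Set.add s x, PySem.Set.add s x) := by
  by_cases h : x ∈ s <;> simp [pvStep, PySem.Set.add, h]

theorem foldl_pvStep_diag (xs : List String) (s : PySem.Set String) :
    xs.foldl pvStep (s, s) = (PySem.Set.update s xs, PySem.Set.update s xs) := by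
  induction xs generalizing s with
  | nil => rfl
  | cons x xs ih => simp only [List.foldl_cons, pvStep_diag, ih]; rfl

theorem foldl_inner_flatMap {α : Type} (l : List α) (f : α → List String)
    (st : PySem.Set String × List String) :
    l.foldl (fun st r => (f r).foldl pvStep st) st = (l.flatMap f).foldl pvStep st := by
  induction l generalizing st with
  | nil => rfl
  | cons r l ih => simp [List.foldl_append, ih]

-- A's guarded body (truthiness check before the seen-set check) is pvStep on the filtered value
theorem guard_eq_pvStep {α : Type} (g : α → String) :
    (fun (st : PySem.Set String × List String) (r : α) =>
        if g r ≠ "" ∧ !(PySem.Set.contains st.1 (g r))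
          then (PySem.Set.add st.1 (g r), st.2 ++ [g r]) else st)
      = (fun st r => if g r ≠ "" then pvStep st (g r) else st) := by
  funext st r
  by_cases h : g r = "" <;> simp [h, pvStep]

theorem foldl_guard_filter {α : Type} (l : List α) (g : α → String)
    (st : PySem.Set String × List String) :
    l.foldl (fun st r => if g r ≠ "" then pvStep st (g r) else st) st
      = ((l.map g).filter (fun i => i ≠ "")).foldl pvStep st := by
  induction l generalizing st with
  | nil => rfl
  | cons r l ih =>
      rw [List.foldl_cons, List.map_cons, List.filter_cons]
      by_cases h : g r = ""
      · rw [if_neg (show ¬(g r ≠ "") from fun hh => hh h),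
            if_neg (show ¬(decide (g r ≠ "") = true) by simp [h]), ih]
      · rw [if_pos h, if_pos (show decide (g r ≠ "") = true by simp [h]), List.foldl_cons, ih]

-- the interleaved seen-set loop over any candidate list is ordered dedup
theorem foldl_pvStep_dedup (xs : List String) :
    (xs.foldl pvStep ((PySem.Set.empty : PySem.Set String), ([] : List String))).2
      = PySem.List.dedup xs := by
  rw [show ((PySem.Set.empty : PySem.Set String), ([] : List String))
      = ((([] : List String) : PySem.Set String), (([] : List String) : PySem.Set String)) from rfl,
    foldl_pvStep_diag]
  simp [PySem.List.dedup_eq_ofList, PySem.Set.ofList_eq_foldl, PySem.Set.update]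

-- filtering out an already-seen element does not change the seen-set fold
theorem update_filter_ne (h : String) (ys : List String) (s : List String)
    (hm : h ∈ s) :
    PySem.Set.update s (ys.filter (fun y => y ≠ h)) = PySem.Set.update s ys := by
  induction ys generalizing s with
  | nil => rfl
  | cons y ys ih =>
      rw [List.filter_cons]
      by_cases hy : y = h
      · rw [if_neg (by simp [hy])]
        have : PySem.Set.add s y = s := by simp [PySem.Set.add, hy, hm]
        rw [show PySem.Set.update s (y :: ys) = PySem.Set.update (PySem.Set.add s y) ys from rfl,
          this]
        exact ih s hm
      · rw [if_pos (by simp [hy])]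
        rw [show PySem.Set.update s (y :: ys.filter (fun y => y ≠ h))
            = PySem.Set.update (PySem.Set.add s y) (ys.filter (fun y => y ≠ h)) from rfl,
          show PySem.Set.update s (y :: ys) = PySem.Set.update (PySem.Set.add s y) ys from rfl]
        apply ih
        simp only [PySem.Set.add]
        split_ifs <;> simp [hm]

-- a head no later element equals can be pulled out of the seen-set fold
theorem update_cons_notmem (h : String) (ys : List String) (s : List String)
    (hy : ∀ y ∈ ys, y ≠ h) :
    PySem.Set.update (h :: s) ys = h :: PySem.Set.update s ys := by
  induction ys generalizing s with
  | nil => rfl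
  | cons y ys ih =>
      have hyh : y ≠ h := hy y (by simp)
      have hadd : PySem.Set.add (h :: s) y
          = h :: PySem.Set.add s y := by
        simp only [PySem.Set.add]
        by_cases hc : y ∈ s <;> simp [hc, hyh]
      rw [show PySem.Set.update (h :: s) (y :: ys)
          = PySem.Set.update (PySem.Set.add (h :: s) y) ys from rfl, hadd,
        show PySem.Set.update s (y :: ys) = PySem.Set.update (PySem.Set.add s y) ys from rfl]
      exact ih _ (fun z hz => hy z (by simp [hz]))

-- B's recursive dedup computes the first-occurrence dedup
theorem dedupRec_eq (xs : List String) : dedupRec xs = PySem.List.dedup xs := by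
  generalize hn : xs.length = n
  induction n using Nat.strong_induction_on generalizing xs with
  | _ n ihn =>
  match xs with
  | [] => rw [dedupRec]; rfl
  | h :: t =>
      rw [show dedupRec (h :: t) = h :: dedupRec (t.filter (fun y => y ≠ h)) from by
        rw [dedupRec]]
      have ih : dedupRec (t.filter (fun y => y ≠ h))
          = PySem.List.dedup (t.filter (fun y => y ≠ h)) := by
        refine ihn _ ?_ _ rfl
        subst hn
        exact Nat.lt_succ_of_le (List.length_filter_le _ _)
      rw [ih]
      have h1 : PySem.List.dedup (h :: t)
          = PySem.Set.update [h] t := by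
        simp [PySem.List.dedup_eq_ofList, PySem.Set.ofList, PySem.Set.update, PySem.Set.add,
          PySem.Set.empty]
      have h2 : PySem.Set.update ([h] : List String) t
          = PySem.Set.update [h] (t.filter (fun y => y ≠ h)) :=
        (update_filter_ne h t [h] (by simp)).symm
      have h3 : PySem.Set.update ([h] : List String) (t.filter (fun y => y ≠ h))
          = h :: PySem.Set.update [] (t.filter (fun y => y ≠ h)) :=
        update_cons_notmem h _ [] (by intro y hy; simpa using (List.mem_filter.mp hy).2)
      rw [h1, h2, h3]
      simp [PySem.List.dedup_eq_ofList, PySem.Set.ofList, PySem.Set.update, PySem.Set.empty]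

theorem generate_related_items_spec : Claim_equal_generate_related_items := by
  intro crafting stonecutting smithing _
  unfold Spec_generate_related_items generate_related_items generate_related_items_alt
  dsimp only
  rw [show (fun (st : PySem.Set String × List String)
        (recipe : List (String × List String)) =>
        (dget recipe "ingredients" ([] : List String)).foldl (fun st ing_id =>
          if !(PySem.Set.contains st.1 ing_id) then (PySem.Set.add st.1 ing_id, st.2 ++ [ing_id]) else st) st)
      = (fun st recipe => (dget recipe "ingredients" ([] : List String)).foldl pvStep st) from rfl]
  rw [foldl_inner_flatMap]
  rw [show (fun (st : PySem.Set String × List String) (recipe : List (String × String)) =>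
        let ing := dget recipe "input_id" ""
        if ing ≠ "" ∧ !(PySem.Set.contains st.1 ing)
          then (PySem.Set.add st.1 ing, st.2 ++ [ing]) else st)
      = (fun st recipe => if dget recipe "input_id" "" ≠ ""
          then pvStep st (dget recipe "input_id" "") else st)
      from guard_eq_pvStep (fun recipe => dget recipe "input_id" "")]
  rw [foldl_guard_filter]
  have hsm : ∀ (recipe : List (String × String)) (st : PySem.Set String × List String),
      (["template_id", "base_id", "addition_id"].foldl (fun st key =>
        let ing := dget recipe key ""
        if ing ≠ "" ∧ !(PySem.Set.contains st.1 ing)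
          then (PySem.Set.add st.1 ing, st.2 ++ [ing]) else st) st)
      = (([dget recipe "template_id" "", dget recipe "base_id" "",
          dget recipe "addition_id" ""].filter (fun i => i ≠ "")).foldl pvStep st) := by
    intro recipe st
    rw [show (fun (st : PySem.Set String × List String) (key : String) =>
          let ing := dget recipe key ""
          if ing ≠ "" ∧ !(PySem.Set.contains st.1 ing)
            then (PySem.Set.add st.1 ing, st.2 ++ [ing]) else st)
        = (fun st key => if dget recipe key "" ≠ "" then pvStep st (dget recipe key "") else st)
        from guard_eq_pvStep (fun key => dget recipe key "")]
    rw [foldl_guard_filter]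
    rfl
  simp only [hsm]
  rw [show (fun (st : PySem.Set String × List String) (recipe : List (String × String)) =>
        (([dget recipe "template_id" "", dget recipe "base_id" "",
          dget recipe "addition_id" ""].filter (fun i => i ≠ "")).foldl pvStep st))
      = (fun st recipe => ((fun r => [dget r "template_id" "", dget r "base_id" "",
          dget r "addition_id" ""].filter (fun i => i ≠ "")) recipe).foldl pvStep st) from rfl]
  rw [foldl_inner_flatMap]
  rw [← List.foldl_append, ← List.foldl_append]
  rw [← List.append_assoc]
  rw [dedupRec_eq]
  exact foldl_pvStep_dedup _
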